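-- pv_equiv track=rewrite | github.com/antoniacobaeus/aoc | 2024/20.py | solve
-- ===== SOURCE A (Python) =====
-- def solve(grid, start, end, dist_to_start, dist_to_end, radius):
--     dist = []
--     for x, y in dist_to_end:
--         for nx, ny in dist_to_start:
--             d = abs(nx-x) + abs(ny-y)
--             if d <= radius:
--                 dist.append(d + dist_to_end[(x, y)] + dist_to_start[(nx, ny)])
--     return dist
-- ===== SOURCE B (Python) =====
-- def _bisect_left(a, x):
--     lo, hi = 0, len(a)
--     while lo < hi:
--         mid = (lo + hi) // 2
--         if a[mid] < x:
--             lo = mid + 1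
--         else:
--             hi = mid
--     return lo
--
--
-- def _bisect_right(a, x):
--     lo, hi = 0, len(a)
--     while lo < hi:
--         mid = (lo + hi) // 2
--         if x < a[mid]:
--             hi = mid
--         else:
--             lo = mid + 1
--     return lo
--
--
-- def solve(grid, start, end, dist_to_start, dist_to_end, radius):
--     # Rotate coordinates: with u = x+y, v = x-y, Manhattan distance becomes
--     # max(|du|, |dv|).  Sort start points by u once; for every end point a
--     # binary search narrows the candidates to the u-window [u-r, u+r], and the
--     # survivors are re-ordered by original insertion index to keep A's order.
--     arr = sorted(
--         ((nx + ny, nx - ny, i, ds)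
--          for i, ((nx, ny), ds) in enumerate(dist_to_start.items())),
--         key=lambda t: t[0])
--     us = [t[0] for t in arr]
--     out = []
--     for (x, y), de in dist_to_end.items():
--         u, v = x + y, x - y
--         lo = _bisect_left(us, u - radius)
--         hi = _bisect_right(us, u + radius)
--         matches = [(i, max(abs(su - u), abs(sv - v)) + de + ds)
--                    for su, sv, i, ds in arr[lo:hi]
--                    if abs(su - u) <= radius and abs(sv - v) <= radius]
--         matches.sort(key=lambda p: p[0])
--         out.extend(w for _, w in matches)
--     return out
-- ===== Notes on version B (the rewrite author's own statement) =====
-- stated objective: alternative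
-- what changed: A scans every (end, start) pair; B rotates coordinates (u=x+y, v=x-y), sorts the start points by u once, binary-searches the u-window [u-r, u+r] for each end point and re-sorts the window's survivors by insertion index to restore A's output order.
import Mathlib
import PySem

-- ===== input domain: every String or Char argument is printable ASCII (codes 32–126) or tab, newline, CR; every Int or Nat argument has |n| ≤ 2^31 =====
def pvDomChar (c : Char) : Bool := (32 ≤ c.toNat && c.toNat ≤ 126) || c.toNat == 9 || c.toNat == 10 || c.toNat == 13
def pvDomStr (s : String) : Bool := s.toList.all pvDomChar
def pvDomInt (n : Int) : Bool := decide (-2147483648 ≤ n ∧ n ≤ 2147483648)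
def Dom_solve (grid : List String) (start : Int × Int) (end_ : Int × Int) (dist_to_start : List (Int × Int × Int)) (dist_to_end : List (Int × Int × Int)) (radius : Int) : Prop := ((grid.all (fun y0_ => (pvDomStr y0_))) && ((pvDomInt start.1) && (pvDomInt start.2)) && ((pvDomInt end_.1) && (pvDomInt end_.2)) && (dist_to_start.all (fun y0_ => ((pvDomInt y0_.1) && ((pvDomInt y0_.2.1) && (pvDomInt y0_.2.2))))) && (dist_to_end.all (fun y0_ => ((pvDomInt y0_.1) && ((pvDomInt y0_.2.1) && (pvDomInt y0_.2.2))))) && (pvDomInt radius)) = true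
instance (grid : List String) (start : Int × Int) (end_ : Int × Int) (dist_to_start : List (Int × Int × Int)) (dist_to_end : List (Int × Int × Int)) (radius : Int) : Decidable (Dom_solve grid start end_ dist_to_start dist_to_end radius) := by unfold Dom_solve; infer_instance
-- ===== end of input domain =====

-- B replaces A's all-pairs scan by a rotated-coordinate (u = x+y, v = x-y) sort of the
-- start points with a binary-search u-window per end point, re-sorting survivors by
-- insertion index to keep A's output order.

-- ===== PORT A =====
-- first-match association-list lookup = dict subscript (the key is always taken from
-- the list itself, so the default is never reached)
def pvDictGet (l : List (Int × Int × Int)) (x y : Int) : Int :=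
  (((l.find? (fun t => t.1 == x && t.2.1 == y)).map (fun t => t.2.2)).getD 0)

def solve (grid : List String) (start : Int × Int) (end_ : Int × Int) (dist_to_start : List (Int × Int × Int)) (dist_to_end : List (Int × Int × Int)) (radius : Int) : List Int :=
  dist_to_end.foldl (fun dist e =>
    dist_to_start.foldl (fun dist s =>
      let d := |s.1 - e.1| + |s.2.1 - e.2.1|
      if d ≤ radius then
        dist ++ [d + pvDictGet dist_to_end e.1 e.2.1 + pvDictGet dist_to_start s.1 s.2.1]
      else dist) dist) []

-- ===== PORT B =====
def solve_alt (grid : List String) (start : Int × Int) (end_ : Int × Int) (dist_to_start : List (Int × Int × Int)) (dist_to_end : List (Int × Int × Int)) (radius : Int) : List Int :=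
  let arr := PySem.List.sorted
    ((PySem.List.enumerate dist_to_start).map
      (fun p => (p.2.1 + p.2.2.1, p.2.1 - p.2.2.1, p.1, p.2.2.2)))
    (fun t => t.1)
  let us := arr.map (fun t => t.1)
  dist_to_end.foldl (fun out e =>
    let u := e.1 + e.2.1
    let v := e.1 - e.2.1
    let lo := PySem.List.bisectLeft us (u - radius)
    let hi := PySem.List.bisectRight us (u + radius)
    let window := PySem.List.slice arr (some (lo : Int)) (some (hi : Int))
    let ms0 := (window.filter
        (fun t => decide (|t.1 - u| ≤ radius ∧ |t.2.1 - v| ≤ radius))).map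
      (fun t => (t.2.2.1, max (|t.1 - u|) (|t.2.1 - v|) + e.2.2 + t.2.2.2))
    out ++ (PySem.List.sorted ms0 (fun p => p.1)).map (fun p => p.2)) []

-- ===== PRECONDITION & SPEC =====
-- Pre_ excludes association lists whose (x, y) keys repeat: such a list does not
-- represent a value of the parameter's Python type dict[tuple[int,int],int] at all
-- (a Python dict cannot hold a duplicate key), so nothing is claimed there.
def Pre_solve (grid : List String) (start : Int × Int) (end_ : Int × Int) (dist_to_start : List (Int × Int × Int)) (dist_to_end : List (Int × Int × Int)) (radius : Int) : Prop :=
  (dist_to_start.map (fun t => (t.1, t.2.1))).Nodup ∧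
  (dist_to_end.map (fun t => (t.1, t.2.1))).Nodup
instance (grid : List String) (start : Int × Int) (end_ : Int × Int) (dist_to_start : List (Int × Int × Int)) (dist_to_end : List (Int × Int × Int)) (radius : Int) : Decidable (Pre_solve grid start end_ dist_to_start dist_to_end radius) := by unfold Pre_solve; infer_instance

def pvWitness_solve : List String × (Int × Int) × (Int × Int) × (List (Int × Int × Int)) × (List (Int × Int × Int)) × Int :=
  (["#"], (0, 0), (1, 1), [(0, 0, 2), (1, 0, 4)], [(1, 1, 3)], 5)

def Spec_solve (grid : List String) (start : Int × Int) (end_ : Int × Int) (dist_to_start : List (Int × Int × Int)) (dist_to_end : List (Int × Int × Int)) (radius : Int) (out : List Int) : Prop := out = solve_alt grid start end_ dist_to_start dist_to_end radius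
instance (grid : List String) (start : Int × Int) (end_ : Int × Int) (dist_to_start : List (Int × Int × Int)) (dist_to_end : List (Int × Int × Int)) (radius : Int) (out : List Int) : Decidable (Spec_solve grid start end_ dist_to_start dist_to_end radius out) := by unfold Spec_solve; infer_instance

-- ===== CLAIM (what is proved, stated in full; the proofs are below) =====
def Claim_equal_solve : Prop := ∀ (grid : List String) (start : Int × Int) (end_ : Int × Int) (dist_to_start : List (Int × Int × Int)) (dist_to_end : List (Int × Int × Int)) (radius : Int), Dom_solve grid start end_ dist_to_start dist_to_end radius → Pre_solve grid start end_ dist_to_start dist_to_end radius → Spec_solve grid start end_ dist_to_start dist_to_end radius (solve grid start end_ dist_to_start dist_to_end radius)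

-- ===== LEMMAS AND PROOFS =====

-- |a+b| ⊔ |a-b| is the Manhattan distance |a| + |b| (the rotated-coordinate identity)
theorem pv_max_abs (a b : Int) : max |a + b| |a - b| = |a| + |b| := by
  rcases abs_cases (a + b) with ⟨h1, h2⟩ | ⟨h1, h2⟩ <;>
    rcases abs_cases (a - b) with ⟨h3, h4⟩ | ⟨h3, h4⟩ <;>
    rcases abs_cases a with ⟨h5, h6⟩ | ⟨h5, h6⟩ <;>
    rcases abs_cases b with ⟨h7, h8⟩ | ⟨h7, h8⟩ <;>
    rw [max_def] <;> split_ifs <;> omega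

-- first-match lookup of an entry's own key returns that entry's value when keys are unique
theorem pv_dget_mem (l : List (Int × Int × Int)) (s : Int × Int × Int)
    (hnd : (l.map (fun t => (t.1, t.2.1))).Nodup) (hs : s ∈ l) :
    pvDictGet l s.1 s.2.1 = s.2.2 := by
  induction l with
  | nil => cases hs
  | cons t rest ih =>
    simp only [List.map_cons, List.nodup_cons, List.mem_map] at hnd
    rcases List.mem_cons.mp hs with rfl | hmem
    · simp [pvDictGet, List.find?]
    · by_cases hk : t.1 = s.1 ∧ t.2.1 = s.2.1
      · exact absurd ⟨s, hmem, by simp [hk.1, hk.2]⟩ hnd.1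
      · have : (t.1 == s.1 && t.2.1 == s.2.1) = false := by
          rcases not_and_or.mp hk with h | h <;> simp [h]
        simp only [pvDictGet, List.find?, this]
        exact ih hnd.2 hmem

-- the bisect window keeps every element the filter keeps
theorem pv_filter_slice (arr : List (Int × Int × Int × Int)) (P : Int × Int × Int × Int → Bool)
    (a b : Int)
    (hsort : (arr.map (fun t => t.1)).Pairwise (· ≤ ·))
    (hP : ∀ t, P t = true → a ≤ t.1 ∧ t.1 ≤ b) :
    (PySem.List.slice arr (some ((PySem.List.bisectLeft (arr.map (fun t => t.1)) a : Nat) : Int))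
      (some ((PySem.List.bisectRight (arr.map (fun t => t.1)) b : Nat) : Int))).filter P
      = arr.filter P := by
  have hL := PySem.List.bisectLeft_spec (arr.map (fun t => t.1)) a hsort
  have hR := PySem.List.bisectRight_spec (arr.map (fun t => t.1)) b hsort
  set lo := PySem.List.bisectLeft (arr.map (fun t => t.1)) a with hlo
  set hi := PySem.List.bisectRight (arr.map (fun t => t.1)) b with hhi
  have hlen : (arr.map (fun t : Int × Int × Int × Int => t.1)).length = arr.length := List.length_map ..
  rw [PySem.List.slice_natCast]
  have htake : (arr.take lo).filter P = [] := by
    rw [List.filter_eq_nil_iff]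
    intro x hx hpx
    rw [List.mem_take_iff_getElem] at hx
    obtain ⟨j, hj, rfl⟩ := hx
    have hjlo : j < lo := lt_of_lt_of_le hj (min_le_left _ _)
    have hjlen : j < arr.length := lt_of_lt_of_le hj (min_le_right _ _)
    have := hL.2.1 j (by omega) hjlo
    rw [List.getElem_map] at this
    have := (hP _ hpx).1
    omega
  have hdrop : ((arr.drop lo).drop (hi - lo)).filter P = [] := by
    rw [List.drop_drop, List.filter_eq_nil_iff]
    intro x hx hpx
    rw [List.mem_drop_iff_getElem] at hx
    obtain ⟨j, hj, rfl⟩ := hx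
    have hge : hi ≤ lo + (hi - lo) + j := by omega
    have := hR.2.2 (lo + (hi - lo) + j) (by omega) hge
    rw [List.getElem_map] at this
    have := (hP _ hpx).2
    omega
  conv_rhs => rw [← List.take_append_drop lo arr, List.filter_append, htake,
    ← List.take_append_drop (hi - lo) (arr.drop lo), List.filter_append, hdrop]
  simp


-- an enumerate loop whose test and value use only the element is the plain loop
theorem pv_enum_filter_map {α β : Type} (S : List α) (Q : α → Bool) (h : α → β) (i0 : Int) :
    ((PySem.List.enumerate S i0).filter (fun p => Q p.2)).map (fun p => h p.2)
      = (S.filter Q).map h := by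
  induction S generalizing i0 with
  | nil => simp [PySem.List.enumerate_nil]
  | cons x xs ih =>
    rw [PySem.List.enumerate_cons]
    by_cases hq : Q x = true <;> simp [hq, ih]

-- A's row for one end point: the filtered scan of the start list, in list order
def pvF (S E : List (Int × Int × Int)) (r : Int) (e : Int × Int × Int) : List Int :=
  (S.filter (fun s => decide (|s.1 - e.1| + |s.2.1 - e.2.1| ≤ r))).map
    (fun s => |s.1 - e.1| + |s.2.1 - e.2.1| + pvDictGet E e.1 e.2.1 + pvDictGet S s.1 s.2.1)

-- B's u-sorted start array
def pvArr (S : List (Int × Int × Int)) : List (Int × Int × Int × Int) :=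
  PySem.List.sorted
    ((PySem.List.enumerate S).map
      (fun p => (p.2.1 + p.2.2.1, p.2.1 - p.2.2.1, p.1, p.2.2.2)))
    (fun t => t.1)

-- B's row for one end point
def pvRowB (S : List (Int × Int × Int)) (r : Int) (e : Int × Int × Int) : List Int :=
  (PySem.List.sorted
    (((PySem.List.slice (pvArr S)
        (some ((PySem.List.bisectLeft ((pvArr S).map (fun t => t.1)) (e.1 + e.2.1 - r) : Nat) : Int))
        (some ((PySem.List.bisectRight ((pvArr S).map (fun t => t.1)) (e.1 + e.2.1 + r) : Nat) : Int))).filter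
        (fun t => decide (|t.1 - (e.1 + e.2.1)| ≤ r ∧ |t.2.1 - (e.1 - e.2.1)| ≤ r))).map
      (fun t => (t.2.2.1, max (|t.1 - (e.1 + e.2.1)|) (|t.2.1 - (e.1 - e.2.1)|) + e.2.2 + t.2.2.2)))
    (fun p => p.1)).map (fun p => p.2)

-- re-sorting the surviving (index, value) pairs by index restores enumerate order
theorem pv_step2 (S : List (Int × Int × Int)) (P : Int × Int × Int × Int → Bool)
    (g : Int × Int × Int × Int → Int × Int) (hg : ∀ t, (g t).1 = t.2.2.1) :
    PySem.List.sorted (((pvArr S).filter P).map g) (fun p => p.1)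
      = ((((PySem.List.enumerate S).map
          (fun p => (p.2.1 + p.2.2.1, p.2.1 - p.2.2.1, p.1, p.2.2.2))).filter P).map g) := by
  apply PySem.List.sorted_eq_of_perm_of_pairwise_lt
  · exact (List.Perm.map _ (List.Perm.filter _ (PySem.List.sorted_perm _ _ _))).symm
  · refine List.Pairwise.map (R := fun a b => a.2.2.1 < b.2.2.1) _ (fun a b h => ?_) ?_
    · rw [hg, hg]; exact h
    · refine List.Pairwise.filter _ ?_
      exact List.Pairwise.map _ (fun a b h => h) (PySem.List.pairwise_lt_enumerate S 0)

theorem pv_row (S E : List (Int × Int × Int)) (r : Int) (e : Int × Int × Int)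
    (hS : (S.map (fun t => (t.1, t.2.1))).Nodup) (hE : (E.map (fun t => (t.1, t.2.1))).Nodup)
    (he : e ∈ E) : pvRowB S r e = pvF S E r e := by
  unfold pvRowB
  rw [pv_filter_slice (pvArr S) _ (e.1 + e.2.1 - r) (e.1 + e.2.1 + r)
    (PySem.List.sorted_map_key_pairwise ..)
    (by
      intro t ht
      rw [decide_eq_true_eq] at ht
      have h1 := abs_le.mp ht.1
      omega)]
  rw [pv_step2 S
    (fun t => decide (|t.1 - (e.1 + e.2.1)| ≤ r ∧ |t.2.1 - (e.1 - e.2.1)| ≤ r))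
    (fun t => (t.2.2.1, max (|t.1 - (e.1 + e.2.1)|) (|t.2.1 - (e.1 - e.2.1)|) + e.2.2 + t.2.2.2))
    (fun t => rfl)]
  have hmain : (((((PySem.List.enumerate S).map
        (fun p => (p.2.1 + p.2.2.1, p.2.1 - p.2.2.1, p.1, p.2.2.2))).filter
        (fun t => decide (|t.1 - (e.1 + e.2.1)| ≤ r ∧ |t.2.1 - (e.1 - e.2.1)| ≤ r))).map
      (fun t => (t.2.2.1, max (|t.1 - (e.1 + e.2.1)|) (|t.2.1 - (e.1 - e.2.1)|) + e.2.2 + t.2.2.2))).map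
        (fun p => p.2))
      = (S.filter (fun s => decide (|s.1 + s.2.1 - (e.1 + e.2.1)| ≤ r ∧ |s.1 - s.2.1 - (e.1 - e.2.1)| ≤ r))).map
        (fun s => max (|s.1 + s.2.1 - (e.1 + e.2.1)|) (|s.1 - s.2.1 - (e.1 - e.2.1)|) + e.2.2 + s.2.2) := by
    rw [List.filter_map, List.map_map, List.map_map]
    exact pv_enum_filter_map S
      (fun s => decide (|s.1 + s.2.1 - (e.1 + e.2.1)| ≤ r ∧ |s.1 - s.2.1 - (e.1 - e.2.1)| ≤ r))
      (fun s => max (|s.1 + s.2.1 - (e.1 + e.2.1)|) (|s.1 - s.2.1 - (e.1 - e.2.1)|) + e.2.2 + s.2.2) 0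
  rw [hmain]
  unfold pvF
  rw [List.filter_congr (q := fun s => decide (|s.1 - e.1| + |s.2.1 - e.2.1| ≤ r))
    (by
      intro s _
      have e1 : s.1 + s.2.1 - (e.1 + e.2.1) = (s.1 - e.1) + (s.2.1 - e.2.1) := by ring
      have e2 : s.1 - s.2.1 - (e.1 - e.2.1) = (s.1 - e.1) - (s.2.1 - e.2.1) := by ring
      rw [e1, e2, decide_eq_decide, ← pv_max_abs, max_le_iff])]
  apply List.map_congr_left
  intro s hs
  have hsS := List.mem_filter.mp hs
  have e1 : s.1 + s.2.1 - (e.1 + e.2.1) = (s.1 - e.1) + (s.2.1 - e.2.1) := by ring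
  have e2 : s.1 - s.2.1 - (e.1 - e.2.1) = (s.1 - e.1) - (s.2.1 - e.2.1) := by ring
  rw [e1, e2, pv_max_abs, pv_dget_mem E e hE he, pv_dget_mem S s hS hsS.1]

-- ===== VERDICT (by name: the statement is the Claim_ definition above) =====
set_option maxHeartbeats 1000000 in
theorem solve_spec : Claim_equal_solve := by
  intro grid start end_ S E r _ hpre
  show solve grid start end_ S E r = solve_alt grid start end_ S E r
  have hA : solve grid start end_ S E r = E.foldl (fun acc e => acc ++ pvF S E r e) [] := by
    unfold solve
    apply PySem.List.foldl_congr_mem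
    intro acc e _
    exact PySem.List.foldl_append_ite
      (fun s => |s.1 - e.1| + |s.2.1 - e.2.1| ≤ r)
      (fun s => |s.1 - e.1| + |s.2.1 - e.2.1| + pvDictGet E e.1 e.2.1 + pvDictGet S s.1 s.2.1) S acc
  have hB : solve_alt grid start end_ S E r = E.foldl (fun out e => out ++ pvRowB S r e) [] := rfl
  rw [hA, hB]
  apply PySem.List.foldl_congr_mem
  intro acc e he
  rw [pv_row S E r e hpre.1 hpre.2 he]
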